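-- pv_equiv track=rewrite | github.com/tiendm1991/python | leetcode/bicontest/bcontest-042/bContest3.py | maximumBinaryString_long
-- ===== SOURCE A (Python) =====
-- def maximumBinaryString_long(binary: str) -> str:
--     n = len(binary)
--     if n == 1:
--         return binary
--     i = binary.find('0')
--     if i == -1:
--         return binary
--     j = i + 1
--     a = [c for c in binary]
--     while j < n:
--         if a[j] == '1':
--             j += 1
--         else:
--             if j == i + 1:
--                 a[i] = '1'
--                 i = j
--                 j += 1
--             else:
--                 a[i] = '1'
--                 a[i + 1] = '0'
--                 a[j] = '1'
--                 i += 1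
--                 j += 1
--     return ''.join(a)
-- ===== SOURCE B (Python) =====
-- def maximumBinaryString_long(binary: str) -> str:
--     if '0' not in binary:
--         return binary
--     n = len(binary)
--     i = binary.index('0')
--     k = binary.count('0')
--     return '1' * (i + k - 1) + '0' + '1' * (n - i - k)
-- ===== Notes on version B (the rewrite author's own statement) =====
-- stated objective: simpler
-- what changed: Replaces A's two-pointer in-place array simulation loop with a closed-form construction: answer = '1'*(i+k-1) + '0' + '1'*(n-i-k) from the first-zero index i and the zero count k.
-- outside the precondition, e.g. on maximumBinaryString_long('0a'): A returns '1a', B returns '01'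
import Mathlib
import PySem

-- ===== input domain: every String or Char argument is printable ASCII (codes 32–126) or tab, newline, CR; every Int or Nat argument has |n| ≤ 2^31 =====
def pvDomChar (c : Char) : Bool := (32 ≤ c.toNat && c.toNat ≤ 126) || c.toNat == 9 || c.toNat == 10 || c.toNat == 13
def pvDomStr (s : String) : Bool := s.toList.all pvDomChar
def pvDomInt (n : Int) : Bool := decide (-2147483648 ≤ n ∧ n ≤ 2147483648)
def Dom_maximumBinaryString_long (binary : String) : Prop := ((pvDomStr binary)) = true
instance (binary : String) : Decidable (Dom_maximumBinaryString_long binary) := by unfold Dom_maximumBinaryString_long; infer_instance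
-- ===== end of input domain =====

-- B replaces A's in-place two-pointer simulation by the closed-form answer
-- '1'*(i+k-1) + '0' + '1'*(n-i-k) (i = first '0' index, k = number of '0's); equal on binary strings, not faster.

-- ===== PORT A =====
-- the while-loop of A; fuel bounds the number of iterations (n - j, ≤ len(a))
def pvLoopA (fuel : Nat) (n : Int) (a : List Char) (i j : Int) : List Char :=
  match fuel with
  | 0 => a
  | Nat.succ f =>
    if j < n then
      if PySem.List.pyGetD a j ' ' == '1' then
        pvLoopA f n a i (j + 1)
      else if j == i + 1 then
        pvLoopA f n (PySem.List.pySetD a i '1') j (j + 1)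
      else
        pvLoopA f n
          (PySem.List.pySetD (PySem.List.pySetD (PySem.List.pySetD a i '1') (i + 1) '0') j '1')
          (i + 1) (j + 1)
    else a


def maximumBinaryString_long (binary : String) : String :=
  let n : Int := PySem.Str.len binary
  if n == 1 then binary
  else
    let i : Int := PySem.Str.find binary "0"
    if i == -1 then binary
    else
      let a : List Char := binary.toList
      String.ofList (pvLoopA a.length n a i (i + 1))

-- ===== PORT B =====
def maximumBinaryString_long_alt (binary : String) : String :=
  if PySem.Str.isIn "0" binary = false then binary
  else
    let n : Int := PySem.Str.len binary
    let i : Int := PySem.Str.find binary "0"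
    let k : Int := (PySem.Str.count binary "0" : Int)
    String.ofList (List.replicate (i + k - 1).toNat '1' ++ '0' :: List.replicate (n - i - k).toNat '1')

-- ===== PRECONDITION & SPEC =====
-- Pre_ admits binary strings (the function's natural domain) and any string containing no '0'
-- (both programs return it unchanged); it excludes strings that contain '0' together with
-- characters outside {'0','1'}, on which A's loop treats every non-'1' character as a zero and
-- returns accidental values (e.g. "0a" ↦ "1a") that B does not reproduce.
def Pre_maximumBinaryString_long (binary : String) : Prop :=
  '0' ∉ binary.toList ∨ binary.toList.all (fun c => c == '0' || c == '1') = true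
instance (binary : String) : Decidable (Pre_maximumBinaryString_long binary) := by
  unfold Pre_maximumBinaryString_long; infer_instance
def pvWitness_maximumBinaryString_long : String := "10"
def Spec_maximumBinaryString_long (binary : String) (out : String) : Prop :=
  out = maximumBinaryString_long_alt binary
instance (binary : String) (out : String) : Decidable (Spec_maximumBinaryString_long binary out) := by
  unfold Spec_maximumBinaryString_long; infer_instance

-- ===== CLAIM (what is proved, stated in full; the proofs are below) =====
def Claim_equal_maximumBinaryString_long : Prop := ∀ (binary : String), Dom_maximumBinaryString_long binary → Pre_maximumBinaryString_long binary → Spec_maximumBinaryString_long binary (maximumBinaryString_long binary)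

-- ===== LEMMAS AND PROOFS =====

lemma pv_go_singleton (c : Char) (l : List Char) : ∀ (fuel acc : Nat), l.length ≤ fuel →
    PySem.Chars.count.go [c] fuel l acc = acc + l.count c := by
  induction l with
  | nil => intro fuel acc h; cases fuel <;> simp [PySem.Chars.count.go]
  | cons x t ih =>
      intro fuel acc h
      cases fuel with
      | zero => simp at h
      | succ f =>
          rw [PySem.Chars.count.go.eq_def]
          simp only [List.isPrefixOf, Bool.and_true]
          by_cases hx : c = x
          · subst hx
            simp only [beq_self_eq_true, if_pos, List.length_cons, List.length_nil, Nat.zero_add,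
              List.drop_succ_cons, List.drop_zero, List.count_cons_self]
            rw [ih f (acc+1) (by simpa using h)]
            omega
          · rw [if_neg (by simp; intro hh; exact hx hh)]
            rw [ih f acc (by simpa using h), List.count_cons_of_ne (Ne.symm hx)]
lemma pv_count_singleton (c : Char) (s : List Char) : PySem.Chars.count s [c] = s.count c := by
  rw [PySem.Chars.count]
  simp [pv_go_singleton c s s.length 0 (Nat.le_refl _)]

lemma pv_set_mid (pre suf : List Char) (x v : Char) (k : Nat) (hk : k = pre.length) :
    (pre ++ x :: suf).set k v = pre ++ v :: suf := by
  subst hk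
  rw [List.set_append_right _ _ (le_refl _)]
  simp

lemma pv_get_mid (pre suf : List Char) (x : Char) (d : Char) (k : Int) (hk : k = (pre.length : Int)) :
    PySem.List.pyGetD (pre ++ x :: suf) k d = x := by
  subst hk
  rw [PySem.List.pyGetD_natCast]
  rw [List.getD_eq_getElem?_getD, List.getElem?_append_right (le_refl _)]
  simp

lemma pvLoopA_eq (s : List Char) : ∀ (p t fuel : Nat), s.length ≤ fuel →
    (∀ c ∈ s, c = '0' ∨ c = '1') →
    pvLoopA fuel ((p : Int) + 1 + (t : Int) + (s.length : Int))
      (List.replicate p '1' ++ '0' :: (List.replicate t '1' ++ s)) (p : Int) ((p : Int) + 1 + (t : Int))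
    = List.replicate (p + s.count '0') '1' ++ '0' :: List.replicate (t + (s.length - s.count '0')) '1' := by
  induction s with
  | nil =>
      intro p t fuel hf hb
      cases fuel with
      | zero => simp [pvLoopA]
      | succ f => simp [pvLoopA]
  | cons c s' ih =>
      intro p t fuel hf hb
      have hz' : s'.count '0' ≤ s'.length := List.count_le_length
      cases fuel with
      | zero => simp at hf
      | succ f =>
          have hf' : s'.length ≤ f := by simp at hf; omega
          have hb' : ∀ c ∈ s', c = '0' ∨ c = '1' := fun x hx => hb x (by simp [hx])
          have hget : PySem.List.pyGetD
              (List.replicate p '1' ++ '0' :: (List.replicate t '1' ++ c :: s'))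
              ((p : Int) + 1 + (t : Int)) ' ' = c := by
            rw [show (List.replicate p '1' ++ '0' :: (List.replicate t '1' ++ c :: s'))
                = (List.replicate p '1' ++ '0' :: List.replicate t '1') ++ c :: s' by simp]
            exact pv_get_mid _ _ _ _ _ (by simp; push_cast; ring)
          rw [show pvLoopA (Nat.succ f) = pvLoopA (f+1) from rfl]
          simp only [pvLoopA]
          rw [if_pos (by simp only [List.length_cons]; push_cast; omega)]
          rw [hget]
          rcases hb c (by simp) with hc | hc
          · -- c = '0'
            subst hc
            rw [if_neg (by decide)]
            by_cases ht : t = 0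
            · subst ht
              rw [if_pos (by simp)]
              have hset : PySem.List.pySetD
                  (List.replicate p '1' ++ '0' :: (List.replicate 0 '1' ++ '0' :: s')) ((p:Int)) '1'
                  = List.replicate (p+1) '1' ++ '0' :: (List.replicate 0 '1' ++ s') := by
                rw [PySem.List.pySetD_natCast]
                simp only [List.replicate_zero, List.nil_append]
                rw [pv_set_mid (List.replicate p '1') ('0'::s') '0' '1' p (by simp)]
                simp [List.replicate_succ']
              rw [hset]
              convert ih (p+1) 0 f hf' hb' using 2
              all_goals first
                | (push_cast [List.length_cons]; omega)
                | (simp [List.count_cons]; omega)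
                | (congr 1 <;> simp [List.count_cons] <;> omega)
                | simp
            · obtain ⟨t'', rfl⟩ : ∃ t'', t = t'' + 1 := ⟨t - 1, by omega⟩
              rw [if_neg (by simp; omega)]
              have hs1 : PySem.List.pySetD
                  (List.replicate p '1' ++ '0' :: (List.replicate (t''+1) '1' ++ '0' :: s')) ((p:Int)) '1'
                  = (List.replicate p '1' ++ ['1']) ++ '1' :: (List.replicate t'' '1' ++ '0' :: s') := by
                rw [PySem.List.pySetD_natCast]
                rw [pv_set_mid (List.replicate p '1') (List.replicate (t''+1) '1' ++ '0' :: s') '0' '1' p (by simp)]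
                simp [List.replicate_succ, List.append_assoc]
              have hs2 : PySem.List.pySetD
                  ((List.replicate p '1' ++ ['1']) ++ '1' :: (List.replicate t'' '1' ++ '0' :: s')) ((p:Int)+1) '0'
                  = ((List.replicate p '1' ++ ['1']) ++ '0' :: List.replicate t'' '1') ++ '0' :: s' := by
                rw [PySem.List.pySetD_of_nonneg _ _ (by positivity)]
                rw [pv_set_mid (List.replicate p '1' ++ ['1']) (List.replicate t'' '1' ++ '0' :: s') '1' '0' _ (by simp)]
                simp [List.append_assoc]
              have hs3 : PySem.List.pySetD
                  (((List.replicate p '1' ++ ['1']) ++ '0' :: List.replicate t'' '1') ++ '0' :: s') ((p:Int)+1+((t''+1 : Nat) : Int)) '1'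
                  = ((List.replicate p '1' ++ ['1']) ++ '0' :: List.replicate t'' '1') ++ '1' :: s' := by
                rw [PySem.List.pySetD_of_nonneg _ _ (by positivity)]
                exact pv_set_mid _ _ _ _ _ (by simp; omega)
              rw [hs1, hs2, hs3]
              have harr : ((List.replicate p '1' ++ ['1']) ++ '0' :: List.replicate t'' '1') ++ '1' :: s'
                  = List.replicate (p+1) '1' ++ '0' :: (List.replicate (t''+1) '1' ++ s') := by
                simp [List.replicate_succ', List.append_assoc]
              rw [harr]
              convert ih (p+1) (t''+1) f hf' hb' using 2
              all_goals first
                | (push_cast [List.length_cons]; omega)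
                | (simp [List.count_cons]; omega)
                | (congr 1 <;> simp [List.count_cons] <;> omega)
                | simp
          · -- c = '1'
            subst hc
            rw [if_pos (by decide)]
            rw [show (List.replicate p '1' ++ '0' :: (List.replicate t '1' ++ '1' :: s'))
                = (List.replicate p '1' ++ '0' :: (List.replicate (t+1) '1' ++ s')) by
              simp [List.replicate_succ']]
            convert ih p (t+1) f hf' hb' using 2
            all_goals first
              | (push_cast [List.length_cons]; omega)
              | (simp [List.count_cons]; omega)
              | (congr 1 <;> simp [List.count_cons] <;> omega)
              | simp

lemma pv_decomp (cs : List Char) (hb : ∀ c ∈ cs, c = '0' ∨ c = '1')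
    (hfind : PySem.Chars.find cs ['0'] ≠ -1) :
    (PySem.Chars.find cs ['0']).toNat < cs.length ∧
    cs = List.replicate (PySem.Chars.find cs ['0']).toNat '1'
        ++ '0' :: cs.drop ((PySem.Chars.find cs ['0']).toNat + 1) := by
  have h0 : 0 ≤ PySem.Chars.find cs ['0'] := by
    have := PySem.Chars.neg_one_le_find cs ['0']
    omega
  obtain ⟨hpre, hmin⟩ := PySem.Chars.find_spec h0
  set p := (PySem.Chars.find cs ['0']).toNat with hp
  obtain ⟨u, hu⟩ := hpre
  have hplen : p < cs.length := by
    by_contra hle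
    have : cs.drop p = [] := List.drop_of_length_le (by omega)
    rw [this] at hu
    simp at hu
  have hcsp : cs[p] = '0' := by
    have h1 : (cs.drop p)[0]'(by rw [← hu]; simp) = '0' := by
      simp [← hu]
    simpa using h1
  constructor
  · exact hplen
  · conv_lhs => rw [← List.take_append_drop p cs, List.drop_eq_getElem_cons hplen]
    rw [hcsp]
    congr 1
    rw [List.eq_replicate_iff]
    refine ⟨by simp; omega, fun b hbmem => ?_⟩
    rw [List.mem_take_iff_getElem] at hbmem
    obtain ⟨m, hm, he⟩ := hbmem
    have hmlen : m < cs.length := lt_of_lt_of_le hm (by simp)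
    have hmp : m < p := by omega
    have hbm : cs[m] = b := by simpa using he
    rcases hb b (by rw [← hbm]; exact List.getElem_mem _) with h | h
    · exfalso
      apply hmin m hmp
      rw [List.drop_eq_getElem_cons hmlen, hbm, h]
      simp
    · exact h

lemma pv_main (binary : String)
    (hpre : binary.toList.all (fun c => c == '0' || c == '1') = true) :
    maximumBinaryString_long binary = maximumBinaryString_long_alt binary := by
  have hb : ∀ c ∈ binary.toList, c = '0' ∨ c = '1' := by
    intro c hc
    have := List.all_eq_true.mp hpre c hc
    simpa using this
  unfold maximumBinaryString_long maximumBinaryString_long_alt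
  simp only [PySem.Str.len_eq, PySem.Str.find_eq, PySem.Str.isIn_eq, PySem.Str.count_eq,
    show ("0" : String).toList = ['0'] from rfl]
  by_cases hin : PySem.Chars.isIn ['0'] binary.toList = false
  · have hnf : PySem.Chars.find binary.toList ['0'] = -1 := by
      rw [PySem.Chars.find_eq_neg_one_iff]
      exact (PySem.Chars.isIn_eq_false_iff _ _).mp hin
    rw [hin, hnf]
    simp
  · have hin' : PySem.Chars.isIn ['0'] binary.toList = true := by
      cases h : PySem.Chars.isIn ['0'] binary.toList
      · exact absurd h hin
      · rfl
    have hnf : PySem.Chars.find binary.toList ['0'] ≠ -1 := by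
      rw [ne_eq, PySem.Chars.find_eq_neg_one_iff]
      rw [PySem.Chars.isIn_iff_infix] at hin'
      exact fun hcon => hcon hin'
    rw [hin']
    simp only [Bool.true_eq_false, if_false]
    obtain ⟨hplen, hdec⟩ := pv_decomp binary.toList hb hnf
    have h0 : 0 ≤ PySem.Chars.find binary.toList ['0'] := by
      have := PySem.Chars.neg_one_le_find binary.toList ['0']
      omega
    set p := (PySem.Chars.find binary.toList ['0']).toNat with hp
    set s := binary.toList.drop (p + 1) with hs
    have hfp : PySem.Chars.find binary.toList ['0'] = (p : Int) := by omega
    have hcnt : PySem.Chars.count binary.toList ['0'] = s.count '0' + 1 := by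
      rw [pv_count_singleton]
      conv_lhs => rw [hdec]
      simp [List.count_append, List.count_replicate]
    have hlen : binary.toList.length = p + 1 + s.length := by
      conv_lhs => rw [hdec]
      simp
      omega
    have hz : s.count '0' ≤ s.length := List.count_le_length
    have hbs : ∀ c ∈ s, c = '0' ∨ c = '1' := by
      intro c hc
      exact hb c (by rw [hdec]; simp [hc])
    -- the two ifs on A's side
    by_cases hn1 : binary.toList.length = 1
    · -- single character; it contains '0', so binary = "0"
      have hp0 : p = 0 := by omega
      have hs0 : s = [] := by
        have := hlen
        rw [hp0] at this
        simp at this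
        exact List.eq_nil_of_length_eq_zero (by omega)
      have hbin : binary.toList = ['0'] := by
        rw [hdec, hp0, hs0]
        simp
      rw [if_pos (by simp [← String.length_toList, hn1])]
      apply String.toList_inj.mp
      rw [String.toList_ofList, hbin]
      decide
    · rw [if_neg (by simp [← String.length_toList, hn1])]
      rw [if_neg (by rw [hfp]; simp)]
      have hlen' : binary.length = p + 1 + s.length := by
        rw [← String.length_toList]; omega
      rw [hfp, hcnt]
      congr 1
      conv_lhs => rw [hdec]
      convert pvLoopA_eq s p 0 ((List.replicate p '1' ++ '0' :: s).length) (by simp; omega) hbs using 2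
      all_goals first
        | (push_cast; omega)
        | (simp <;> push_cast <;> omega)
        | (congr 1 <;> simp <;> omega)

-- when binary contains no '0' both programs return it unchanged
lemma pv_nozero (binary : String) (h : '0' ∉ binary.toList) :
    maximumBinaryString_long binary = maximumBinaryString_long_alt binary := by
  unfold maximumBinaryString_long maximumBinaryString_long_alt
  simp only [PySem.Str.len_eq, PySem.Str.find_eq, PySem.Str.isIn_eq,
    show ("0" : String).toList = ['0'] from rfl]
  have hin : PySem.Chars.isIn ['0'] binary.toList = false := by
    rw [PySem.Chars.isIn_eq_false_iff, List.singleton_infix_iff]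
    exact h
  have hnf : PySem.Chars.find binary.toList ['0'] = -1 := by
    rw [PySem.Chars.find_eq_neg_one_iff, List.singleton_infix_iff]
    exact h
  rw [hin, hnf]
  simp

-- ===== VERDICT (by name: the statement is the Claim_ definition above) =====
theorem maximumBinaryString_long_spec : Claim_equal_maximumBinaryString_long := by
  intro binary _ hpre
  unfold Pre_maximumBinaryString_long at hpre
  unfold Spec_maximumBinaryString_long
  rcases hpre with h | h
  · exact pv_nozero binary h
  · exact pv_main binary h
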